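-- pv_equiv track=rewrite | github.com/Rebellians/ArnavProjects | calendars.py | toMiddle
-- ===== SOURCE A (Python) =====
-- def toMiddle(year):
--     ageLengths = [None, 590, 3441, 3021, 2000, 2000, 2000]
--     middleYear = year - 1971
--     age = 7
--     while middleYear < 0 and age > 1:
--         age -= 1
--         middleYear += ageLengths[age]
--     return (age, middleYear)
-- ===== SOURCE B (Python) =====
-- def toMiddle(year):
--     # Cumulative offsets from the age-7 boundary; binary search replaces the
--     # incremental backward accumulation loop with a one-shot table lookup.
--     S = [0, 2000, 4000, 6000, 9021, 12462, 13052]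
--     m = year - 1971
--     target = -m
--     lo, hi = 0, 7
--     while lo < hi:
--         mid = (lo + hi) // 2
--         if S[mid] < target:
--             lo = mid + 1
--         else:
--             hi = mid
--     idx = min(lo, 6)
--     return (7 - idx, m + S[idx])
-- ===== Notes on version B (the rewrite author's own statement) =====
-- stated objective: alternative
-- what changed: Replaced the backward accumulation while-loop over per-age lengths with a precomputed cumulative-offset table and a binary search (bisect_left by hand) that picks the age bucket in one shot.
import Mathlib
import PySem

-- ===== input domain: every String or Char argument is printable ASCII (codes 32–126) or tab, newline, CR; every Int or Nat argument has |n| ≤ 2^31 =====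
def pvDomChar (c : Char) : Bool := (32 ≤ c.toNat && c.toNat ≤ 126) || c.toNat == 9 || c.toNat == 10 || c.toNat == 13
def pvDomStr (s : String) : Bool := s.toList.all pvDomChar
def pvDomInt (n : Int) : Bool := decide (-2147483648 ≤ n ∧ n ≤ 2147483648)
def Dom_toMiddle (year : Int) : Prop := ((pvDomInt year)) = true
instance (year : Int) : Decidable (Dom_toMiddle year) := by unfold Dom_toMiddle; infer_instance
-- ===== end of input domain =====

-- B replaces A's backward accumulation while-loop by a precomputed cumulative-offset
-- table searched with a hand-written bisect_left; alternative decomposition (not claimed faster).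

-- ===== PORT A =====
def pvAgeLengths : List (Option Int) :=
  [none, some 590, some 3441, some 3021, some 2000, some 2000, some 2000]

-- A's while loop; fuel 7 bounds the ≤ 6 iterations (age goes 7 → 1).
-- Indexing happens only at age' ∈ [1,6], so the `.getD` defaults never fire.
def pvLoopA (middleYear age : Int) : Nat → Int × Int
  | 0 => (age, middleYear)
  | fuel + 1 =>
    if middleYear < 0 ∧ age > 1 then
      let age' := age - 1
      pvLoopA (middleYear + (((PySem.List.pyGet? pvAgeLengths age').getD none).getD 0)) age' fuel
    else (age, middleYear)

def toMiddle (year : Int) : Int × Int :=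
  pvLoopA (year - 1971) 7 7

-- ===== PORT B =====
def pvS : List Int := [0, 2000, 4000, 6000, 9021, 12462, 13052]

-- Source B's hand-written bisect_left loop; lo/hi stay inside [0,7] so indexing is safe.
-- Fuel 7 bounds the ≤ 3 halving iterations on the 7-entry table.
def pvBsLoop (target lo hi : Int) : Nat → Int
  | 0 => lo
  | fuel + 1 =>
    if lo < hi then
      let mid := PySem.Int.floordiv (lo + hi) 2
      if (PySem.List.pyGet? pvS mid).getD 0 < target then
        pvBsLoop target (mid + 1) hi fuel
      else
        pvBsLoop target lo mid fuel
    else lo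

def toMiddle_alt (year : Int) : Int × Int :=
  let m := year - 1971
  let idx := min (pvBsLoop (-m) 0 7 7) 6
  (7 - idx, m + (PySem.List.pyGet? pvS idx).getD 0)

-- ===== PRECONDITION & SPEC =====
def Spec_toMiddle (year : Int) (out : Int × Int) : Prop := out = toMiddle_alt year
instance (year : Int) (out : Int × Int) : Decidable (Spec_toMiddle year out) := by unfold Spec_toMiddle; infer_instance

-- ===== CLAIM (what is proved, stated in full; the proofs are below) =====
def Claim_equal_toMiddle : Prop := ∀ (year : Int), Dom_toMiddle year → Spec_toMiddle year (toMiddle year)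

-- ===== LEMMAS AND PROOFS =====

theorem pvLoopA_stop (m a : Int) (f : Nat) (h : ¬(m < 0 ∧ a > 1)) : pvLoopA m a f = (a, m) := by
  cases f <;> simp [pvLoopA, h]

theorem pvLoopA_step (m a : Int) (f : Nat) (h : m < 0 ∧ a > 1) :
    pvLoopA m a (f + 1) =
      pvLoopA (m + (((PySem.List.pyGet? pvAgeLengths (a - 1)).getD none).getD 0)) (a - 1) f := by
  simp [pvLoopA, h]

-- A's loop as an explicit piecewise function of m = year - 1971
theorem pvA_piecewise (m : Int) :
    pvLoopA m 7 7 =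
      if 0 ≤ m then (7, m)
      else if 0 ≤ m + 2000 then (6, m + 2000)
      else if 0 ≤ m + 4000 then (5, m + 4000)
      else if 0 ≤ m + 6000 then (4, m + 6000)
      else if 0 ≤ m + 9021 then (3, m + 9021)
      else if 0 ≤ m + 12462 then (2, m + 12462)
      else (1, m + 13052) := by
  by_cases h0 : 0 ≤ m
  · rw [pvLoopA_stop _ _ _ (by omega), if_pos h0]
  · rw [show (7:Nat) = 6 + 1 from rfl, pvLoopA_step _ _ _ (by omega),
      show (7:Int) - 1 = 6 from by norm_num,
      show ((PySem.List.pyGet? pvAgeLengths 6).getD none).getD 0 = 2000 from by decide]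
    by_cases h1 : 0 ≤ m + 2000
    · rw [pvLoopA_stop _ _ _ (by omega), if_neg h0, if_pos h1]
    · rw [show (6:Nat) = 5 + 1 from rfl, pvLoopA_step _ _ _ (by omega),
        show (6:Int) - 1 = 5 from by norm_num,
        show ((PySem.List.pyGet? pvAgeLengths 5).getD none).getD 0 = 2000 from by decide,
        show m + 2000 + 2000 = m + 4000 from by ring]
      by_cases h2 : 0 ≤ m + 4000
      · rw [pvLoopA_stop _ _ _ (by omega), if_neg h0, if_neg h1, if_pos h2]
      · rw [show (5:Nat) = 4 + 1 from rfl, pvLoopA_step _ _ _ (by omega),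
          show (5:Int) - 1 = 4 from by norm_num,
          show ((PySem.List.pyGet? pvAgeLengths 4).getD none).getD 0 = 2000 from by decide,
          show m + 4000 + 2000 = m + 6000 from by ring]
        by_cases h3 : 0 ≤ m + 6000
        · rw [pvLoopA_stop _ _ _ (by omega), if_neg h0, if_neg h1, if_neg h2, if_pos h3]
        · rw [show (4:Nat) = 3 + 1 from rfl, pvLoopA_step _ _ _ (by omega),
            show (4:Int) - 1 = 3 from by norm_num,
            show ((PySem.List.pyGet? pvAgeLengths 3).getD none).getD 0 = 3021 from by decide,
            show m + 6000 + 3021 = m + 9021 from by ring]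
          by_cases h4 : 0 ≤ m + 9021
          · rw [pvLoopA_stop _ _ _ (by omega), if_neg h0, if_neg h1, if_neg h2, if_neg h3, if_pos h4]
          · rw [show (3:Nat) = 2 + 1 from rfl, pvLoopA_step _ _ _ (by omega),
              show (3:Int) - 1 = 2 from by norm_num,
              show ((PySem.List.pyGet? pvAgeLengths 2).getD none).getD 0 = 3441 from by decide,
              show m + 9021 + 3441 = m + 12462 from by ring]
            by_cases h5 : 0 ≤ m + 12462
            · rw [pvLoopA_stop _ _ _ (by omega), if_neg h0, if_neg h1, if_neg h2, if_neg h3, if_neg h4, if_pos h5]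
            · rw [show (2:Nat) = 1 + 1 from rfl, pvLoopA_step _ _ _ (by omega),
                show (2:Int) - 1 = 1 from by norm_num,
                show ((PySem.List.pyGet? pvAgeLengths 1).getD none).getD 0 = 590 from by decide,
                show m + 12462 + 590 = m + 13052 from by ring,
                pvLoopA_stop _ _ _ (by omega),
                if_neg h0, if_neg h1, if_neg h2, if_neg h3, if_neg h4, if_neg h5]

theorem pvBs_node (t lo hi mid v : Int) (f : Nat) (h : lo < hi)
    (hm : PySem.Int.floordiv (lo + hi) 2 = mid)
    (hv : (PySem.List.pyGet? pvS mid).getD 0 = v) :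
    pvBsLoop t lo hi (f + 1) =
      if v < t then pvBsLoop t (mid + 1) hi f else pvBsLoop t lo mid f := by
  simp only [pvBsLoop, if_pos h, hm, hv]

theorem pvBs_leaf (t a : Int) (f : Nat) : pvBsLoop t a a f = a := by
  cases f <;> simp [pvBsLoop]

-- B's binary search as the same piecewise selection of the index (t = -m)
theorem pvB_piecewise (t : Int) :
    pvBsLoop t 0 7 7 =
      if t ≤ 0 then 0
      else if t ≤ 2000 then 1
      else if t ≤ 4000 then 2
      else if t ≤ 6000 then 3
      else if t ≤ 9021 then 4
      else if t ≤ 12462 then 5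
      else if t ≤ 13052 then 6
      else 7 := by
  have n07 := pvBs_node t 0 7 3 6000 6 (by norm_num) (by decide) (by decide)
  have n47 := pvBs_node t 4 7 5 12462 5 (by norm_num) (by decide) (by decide)
  have n03 := pvBs_node t 0 3 1 2000 5 (by norm_num) (by decide) (by decide)
  have n67 := pvBs_node t 6 7 6 13052 4 (by norm_num) (by decide) (by decide)
  have n45 := pvBs_node t 4 5 4 9021 4 (by norm_num) (by decide) (by decide)
  have n23 := pvBs_node t 2 3 2 4000 4 (by norm_num) (by decide) (by decide)
  have n01 := pvBs_node t 0 1 0 0 4 (by norm_num) (by decide) (by decide)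
  have f6 : (6:Nat) = 5 + 1 := rfl
  have f5 : (5:Nat) = 4 + 1 := rfl
  rw [show (7:Nat) = 6 + 1 from rfl, n07]
  by_cases c0 : t ≤ 0
  · rw [if_neg (by omega), f6, n03, if_neg (by omega), f5, n01, if_neg (by omega), pvBs_leaf,
      if_pos c0]
  · by_cases c1 : t ≤ 2000
    · rw [if_neg (by omega), f6, n03, if_neg (by omega), f5, n01, if_pos (by omega),
        show (0:Int) + 1 = 1 from by norm_num, pvBs_leaf, if_neg c0, if_pos c1]
    · by_cases c2 : t ≤ 4000
      · rw [if_neg (by omega), f6, n03, if_pos (by omega),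
          show (1:Int) + 1 = 2 from by norm_num, f5, n23, if_neg (by omega), pvBs_leaf,
          if_neg c0, if_neg c1, if_pos c2]
      · by_cases c3 : t ≤ 6000
        · rw [if_neg (by omega), f6, n03, if_pos (by omega),
            show (1:Int) + 1 = 2 from by norm_num, f5, n23, if_pos (by omega),
            show (2:Int) + 1 = 3 from by norm_num, pvBs_leaf,
            if_neg c0, if_neg c1, if_neg c2, if_pos c3]
        · by_cases c4 : t ≤ 9021
          · rw [if_pos (by omega), show (3:Int) + 1 = 4 from by norm_num,
              f6, n47, if_neg (by omega), f5, n45, if_neg (by omega), pvBs_leaf,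
              if_neg c0, if_neg c1, if_neg c2, if_neg c3, if_pos c4]
          · by_cases c5 : t ≤ 12462
            · rw [if_pos (by omega), show (3:Int) + 1 = 4 from by norm_num,
                f6, n47, if_neg (by omega), f5, n45, if_pos (by omega),
                show (4:Int) + 1 = 5 from by norm_num, pvBs_leaf,
                if_neg c0, if_neg c1, if_neg c2, if_neg c3, if_neg c4, if_pos c5]
            · by_cases c6 : t ≤ 13052
              · rw [if_pos (by omega), show (3:Int) + 1 = 4 from by norm_num,
                  f6, n47, if_pos (by omega), show (5:Int) + 1 = 6 from by norm_num,
                  f5, n67, if_neg (by omega), pvBs_leaf,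
                  if_neg c0, if_neg c1, if_neg c2, if_neg c3, if_neg c4, if_neg c5, if_pos c6]
              · rw [if_pos (by omega), show (3:Int) + 1 = 4 from by norm_num,
                  f6, n47, if_pos (by omega), show (5:Int) + 1 = 6 from by norm_num,
                  f5, n67, if_pos (by omega), show (6:Int) + 1 = 7 from by norm_num, pvBs_leaf,
                  if_neg c0, if_neg c1, if_neg c2, if_neg c3, if_neg c4, if_neg c5, if_neg c6]

-- ===== VERDICT (by name: the statement is the Claim_ definition above) =====
theorem toMiddle_spec : Claim_equal_toMiddle := by
  intro year _
  simp only [Spec_toMiddle, toMiddle, toMiddle_alt]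
  rw [pvA_piecewise, pvB_piecewise]
  by_cases h0 : 0 ≤ year - 1971
  · rw [if_pos h0, if_pos (by omega : -(year - 1971) ≤ 0),
      show min (0:Int) 6 = 0 from by norm_num,
      show ((PySem.List.pyGet? pvS 0).getD 0 : Int) = 0 from by decide]
    norm_num
  · by_cases h1 : 0 ≤ year - 1971 + 2000
    · rw [if_neg h0, if_pos h1, if_neg (by omega : ¬(-(year - 1971) ≤ 0)),
        if_pos (by omega : -(year - 1971) ≤ 2000),
        show min (1:Int) 6 = 1 from by norm_num,
        show ((PySem.List.pyGet? pvS 1).getD 0 : Int) = 2000 from by decide]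
      norm_num
    · by_cases h2 : 0 ≤ year - 1971 + 4000
      · rw [if_neg h0, if_neg h1, if_pos h2, if_neg (by omega : ¬(-(year - 1971) ≤ 0)),
          if_neg (by omega : ¬(-(year - 1971) ≤ 2000)), if_pos (by omega : -(year - 1971) ≤ 4000),
          show min (2:Int) 6 = 2 from by norm_num,
          show ((PySem.List.pyGet? pvS 2).getD 0 : Int) = 4000 from by decide]
        norm_num
      · by_cases h3 : 0 ≤ year - 1971 + 6000
        · rw [if_neg h0, if_neg h1, if_neg h2, if_pos h3,
            if_neg (by omega : ¬(-(year - 1971) ≤ 0)), if_neg (by omega : ¬(-(year - 1971) ≤ 2000)),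
            if_neg (by omega : ¬(-(year - 1971) ≤ 4000)), if_pos (by omega : -(year - 1971) ≤ 6000),
            show min (3:Int) 6 = 3 from by norm_num,
            show ((PySem.List.pyGet? pvS 3).getD 0 : Int) = 6000 from by decide]
          norm_num
        · by_cases h4 : 0 ≤ year - 1971 + 9021
          · rw [if_neg h0, if_neg h1, if_neg h2, if_neg h3, if_pos h4,
              if_neg (by omega : ¬(-(year - 1971) ≤ 0)), if_neg (by omega : ¬(-(year - 1971) ≤ 2000)),
              if_neg (by omega : ¬(-(year - 1971) ≤ 4000)), if_neg (by omega : ¬(-(year - 1971) ≤ 6000)),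
              if_pos (by omega : -(year - 1971) ≤ 9021),
              show min (4:Int) 6 = 4 from by norm_num,
              show ((PySem.List.pyGet? pvS 4).getD 0 : Int) = 9021 from by decide]
            norm_num
          · by_cases h5 : 0 ≤ year - 1971 + 12462
            · rw [if_neg h0, if_neg h1, if_neg h2, if_neg h3, if_neg h4, if_pos h5,
                if_neg (by omega : ¬(-(year - 1971) ≤ 0)), if_neg (by omega : ¬(-(year - 1971) ≤ 2000)),
                if_neg (by omega : ¬(-(year - 1971) ≤ 4000)), if_neg (by omega : ¬(-(year - 1971) ≤ 6000)),
                if_neg (by omega : ¬(-(year - 1971) ≤ 9021)), if_pos (by omega : -(year - 1971) ≤ 12462),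
                show min (5:Int) 6 = 5 from by norm_num,
                show ((PySem.List.pyGet? pvS 5).getD 0 : Int) = 12462 from by decide]
              norm_num
            · by_cases h6 : -(year - 1971) ≤ 13052
              · rw [if_neg h0, if_neg h1, if_neg h2, if_neg h3, if_neg h4, if_neg h5,
                  if_neg (by omega : ¬(-(year - 1971) ≤ 0)), if_neg (by omega : ¬(-(year - 1971) ≤ 2000)),
                  if_neg (by omega : ¬(-(year - 1971) ≤ 4000)), if_neg (by omega : ¬(-(year - 1971) ≤ 6000)),
                  if_neg (by omega : ¬(-(year - 1971) ≤ 9021)), if_neg (by omega : ¬(-(year - 1971) ≤ 12462)),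
                  if_pos h6,
                  show min (6:Int) 6 = 6 from by norm_num,
                  show ((PySem.List.pyGet? pvS 6).getD 0 : Int) = 13052 from by decide]
                norm_num
              · rw [if_neg h0, if_neg h1, if_neg h2, if_neg h3, if_neg h4, if_neg h5,
                  if_neg (by omega : ¬(-(year - 1971) ≤ 0)), if_neg (by omega : ¬(-(year - 1971) ≤ 2000)),
                  if_neg (by omega : ¬(-(year - 1971) ≤ 4000)), if_neg (by omega : ¬(-(year - 1971) ≤ 6000)),
                  if_neg (by omega : ¬(-(year - 1971) ≤ 9021)), if_neg (by omega : ¬(-(year - 1971) ≤ 12462)),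
                  if_neg h6,
                  show min (7:Int) 6 = 6 from by norm_num,
                  show ((PySem.List.pyGet? pvS 6).getD 0 : Int) = 13052 from by decide]
                norm_num
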